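-- pv_equiv track=rewrite | github.com/ThatOneRomanian/CodeSentinel | src/sentinel/rules/severity.py | get_provider_aware_severity
-- ===== SOURCE A (Python) =====
-- from typing import Dict, List, Optional
--
-- SEVERITY_RANK = {
--     "critical": 4,
--     "high": 3,
--     "medium": 2,
--     "low": 1,
--     "info": 0,
-- }
--
-- def severity_value(level: str) -> int:
--     """
--     Convert a severity level string to its numeric value.
--
--     Args:
--         level: Severity level as string (e.g., 'high', 'medium', 'low')
--
--     Returns:
--         Numeric severity value (4 for critical, 3 for high, etc.)
--         Returns -1 for unknown severity levels or None input
--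
--     Examples:
--         >>> severity_value('high')
--         3
--         >>> severity_value('unknown')
--         -1
--         >>> severity_value(None)
--         -1
--         >>> severity_value(" critical ")
--         4
--     """
--     if level is None:
--         return -1
--
--     # Handle whitespace by stripping and converting to lowercase
--     normalized_level = level.strip().lower() if isinstance(level, str) else str(level)
--
--     return SEVERITY_RANK.get(normalized_level, -1)
--
-- def get_provider_aware_severity(
--     base_severity: str,
--     token_value: Optional[str] = None,
--     tags: Optional[List[str]] = None
-- ) -> str:
--     """
--     Adjust severity level based on provider context and test/production indicators.
--
--     Args:
--         base_severity: Original severity level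
--         token_value: Token value for provider classification
--         tags: Finding tags for context
--
--     Returns:
--         Adjusted severity level
--     """
--     if not token_value and not tags:
--         return base_severity
--
--     severity_rank = severity_value(base_severity)
--     if severity_rank == -1:
--         return base_severity
--
--     # Check for test indicators that should lower severity
--     if tags:
--         test_indicators = ["test", "staging", "development", "sandbox"]
--         if any(indicator in tags for indicator in test_indicators):
--             # Downgrade severity by one level for test environments
--             if severity_rank > 1:  # Don't downgrade below low
--                 adjusted_rank = severity_rank - 1
--                 for level, rank in SEVERITY_RANK.items():
--                     if rank == adjusted_rank:
--                         return level
--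
--     # Check for production indicators that might increase severity
--     if tags:
--         prod_indicators = ["live", "production", "prod"]
--         if any(indicator in tags for indicator in prod_indicators):
--             # Upgrade severity by one level for production (if not already critical)
--             if severity_rank < 4:  # Don't upgrade above critical
--                 adjusted_rank = severity_rank + 1
--                 for level, rank in SEVERITY_RANK.items():
--                     if rank == adjusted_rank:
--                         return level
--
--     return base_severity
-- ===== SOURCE B (Python) =====
-- # Table-driven: two transition maps (no numeric ranks, no index arithmetic);
-- # a level is adjustable iff it is a key of the relevant map.
-- DOWNGRADE = {"critical": "high", "high": "medium", "medium": "low"}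
-- UPGRADE = {"info": "low", "low": "medium", "medium": "high", "high": "critical"}
-- TEST_TAGS = frozenset(("test", "staging", "development", "sandbox"))
-- PROD_TAGS = frozenset(("live", "production", "prod"))
--
--
-- def get_provider_aware_severity(base_severity, token_value=None, tags=None):
--     # Without tags no adjustment is possible (token_value alone never changes anything).
--     if not tags:
--         return base_severity
--     level = base_severity.strip().lower()
--     if not TEST_TAGS.isdisjoint(tags) and level in DOWNGRADE:
--         return DOWNGRADE[level]
--     if not PROD_TAGS.isdisjoint(tags) and level in UPGRADE:
--         return UPGRADE[level]
--     return base_severity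
-- ===== Notes on version B (the rewrite author's own statement) =====
-- stated objective: simpler
-- what changed: B discards the numeric rank scale entirely: instead of A's rank dict, rank arithmetic and two reverse-lookup loops over SEVERITY_RANK.items(), B uses two direct transition maps (DOWNGRADE/UPGRADE) keyed by the normalized level, so an adjustment is a single dict lookup and a level can move iff it is a key of the relevant map; the token_value guard is dropped since it never affects the result.
import Mathlib
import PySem

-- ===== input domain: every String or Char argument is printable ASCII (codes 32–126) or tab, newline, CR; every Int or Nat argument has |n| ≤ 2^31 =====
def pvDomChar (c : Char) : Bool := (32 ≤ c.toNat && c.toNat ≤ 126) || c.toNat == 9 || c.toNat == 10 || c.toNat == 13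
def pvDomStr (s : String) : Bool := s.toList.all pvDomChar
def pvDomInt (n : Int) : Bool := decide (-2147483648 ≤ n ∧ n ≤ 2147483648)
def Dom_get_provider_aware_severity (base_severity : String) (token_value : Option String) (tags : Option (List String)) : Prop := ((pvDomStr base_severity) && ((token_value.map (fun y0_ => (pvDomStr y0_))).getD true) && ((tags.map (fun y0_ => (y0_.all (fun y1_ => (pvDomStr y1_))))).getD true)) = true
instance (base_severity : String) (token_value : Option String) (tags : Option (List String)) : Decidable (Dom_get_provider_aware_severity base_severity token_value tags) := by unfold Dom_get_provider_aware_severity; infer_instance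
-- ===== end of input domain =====

-- B discards A's numeric rank scale and reverse-lookup loops over SEVERITY_RANK.items(): two direct transition maps (DOWNGRADE/UPGRADE) keyed by the normalized level make each adjustment a single table lookup; the token_value guard is dropped, as it never affects the result.


-- ===== PORT A =====
-- SEVERITY_RANK
def pvSEVERITY_RANK : PySem.Dict String Int :=
  PySem.Dict.ofList [("critical", 4), ("high", 3), ("medium", 2), ("low", 1), ("info", 0)]

def severity_value (level : String) : Int :=
  PySem.Dict.getD pvSEVERITY_RANK (PySem.Str.lower (PySem.Str.strip level)) (-1)

-- 'for level, rank in SEVERITY_RANK.items(): if rank == adjusted_rank: return level'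
def pvFindByRank : List (String × Int) → Int → Option String
  | [], _ => none
  | (l, r) :: rest, adj => if r = adj then some l else pvFindByRank rest adj

def get_provider_aware_severity (base_severity : String) (token_value : Option String) (tags : Option (List String)) : String :=
  if ((match token_value with | none => true | some s => s == "") &&
      (match tags with | none => true | some l => l.isEmpty)) then base_severity
  else
    let severity_rank := severity_value base_severity
    if severity_rank = -1 then base_severity
    else
      let tagsTruthy := match tags with | none => false | some l => !l.isEmpty
      let tl := tags.getD []
      let down : Option String :=
        if tagsTruthy then
          if ["test", "staging", "development", "sandbox"].any (fun i => tl.contains i) then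
            if severity_rank > 1 then pvFindByRank pvSEVERITY_RANK.items (severity_rank - 1)
            else none
          else none
        else none
      match down with
      | some l => l
      | none =>
        let up : Option String :=
          if tagsTruthy then
            if ["live", "production", "prod"].any (fun i => tl.contains i) then
              if severity_rank < 4 then pvFindByRank pvSEVERITY_RANK.items (severity_rank + 1)
              else none
            else none
          else none
        match up with
        | some l => l
        | none => base_severity

-- ===== PORT B =====
def pvDOWNGRADE : PySem.Dict String String :=
  PySem.Dict.ofList [("critical", "high"), ("high", "medium"), ("medium", "low")]
def pvUPGRADE : PySem.Dict String String :=
  PySem.Dict.ofList [("info", "low"), ("low", "medium"), ("medium", "high"), ("high", "critical")]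
def pvTEST_TAGS : PySem.Set String := PySem.Set.ofList ["test", "staging", "development", "sandbox"]
def pvPROD_TAGS : PySem.Set String := PySem.Set.ofList ["live", "production", "prod"]

def get_provider_aware_severity_alt (base_severity : String) (token_value : Option String) (tags : Option (List String)) : String :=
  match tags with
  | none => base_severity
  | some ts =>
    if ts.isEmpty then base_severity
    else
      let level := PySem.Str.lower (PySem.Str.strip base_severity)
      if !(PySem.Set.isdisjoint pvTEST_TAGS ts) && pvDOWNGRADE.contains level then
        pvDOWNGRADE.getD level base_severity
      else if !(PySem.Set.isdisjoint pvPROD_TAGS ts) && pvUPGRADE.contains level then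
        pvUPGRADE.getD level base_severity
      else base_severity

-- ===== PRECONDITION & SPEC =====
def Spec_get_provider_aware_severity (base_severity : String) (token_value : Option String) (tags : Option (List String)) (out : String) : Prop := out = get_provider_aware_severity_alt base_severity token_value tags
instance (base_severity : String) (token_value : Option String) (tags : Option (List String)) (out : String) : Decidable (Spec_get_provider_aware_severity base_severity token_value tags out) := by unfold Spec_get_provider_aware_severity; infer_instance

-- ===== CLAIM (what is proved, stated in full; the proofs are below) =====
def Claim_equal_get_provider_aware_severity : Prop := ∀ (base_severity : String) (token_value : Option String) (tags : Option (List String)), Dom_get_provider_aware_severity base_severity token_value tags → Spec_get_provider_aware_severity base_severity token_value tags (get_provider_aware_severity base_severity token_value tags)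

-- ===== LEMMAS AND PROOFS =====

theorem pv_exists_mem4 (ts : List String) (a b c d : String) :
    (∃ x ∈ ts, x = a ∨ x = b ∨ x = c ∨ x = d) ↔ (a ∈ ts ∨ b ∈ ts ∨ c ∈ ts ∨ d ∈ ts) := by
  constructor
  · rintro ⟨x, hx, (rfl|rfl|rfl|rfl)⟩ <;> tauto
  · rintro (h|h|h|h) <;> exact ⟨_, h, by tauto⟩

theorem pv_exists_mem3 (ts : List String) (a b c : String) :
    (∃ x ∈ ts, x = a ∨ x = b ∨ x = c) ↔ (a ∈ ts ∨ b ∈ ts ∨ c ∈ ts) := by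
  constructor
  · rintro ⟨x, hx, (rfl|rfl|rfl)⟩ <;> tauto
  · rintro (h|h|h) <;> exact ⟨_, h, by tauto⟩

theorem pv_eq_all (b : String) (tv : Option String) (tags : Option (List String)) :
    get_provider_aware_severity b tv tags = get_provider_aware_severity_alt b tv tags := by
  unfold get_provider_aware_severity get_provider_aware_severity_alt severity_value
  cases tags with
  | none => cases tv <;> simp
  | some ts =>
    cases hts : ts.isEmpty
    case true =>
      have : ts = [] := by simpa [List.isEmpty_iff] using hts
      subst this
      cases tv <;> simp
    case false =>
      simp only [hts, Bool.false_eq_true, if_false, Bool.not_false, Bool.and_false]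
      have hT : pvTEST_TAGS = ["test", "staging", "development", "sandbox"] := by decide
      have hP : pvPROD_TAGS = ["live", "production", "prod"] := by decide
      have hD : pvDOWNGRADE = PySem.Dict.mk [("critical", "high"), ("high", "medium"), ("medium", "low")] := by decide
      have hU : pvUPGRADE = PySem.Dict.mk [("info", "low"), ("low", "medium"), ("medium", "high"), ("high", "critical")] := by decide
      set n := PySem.Str.lower (PySem.Str.strip b) with hn
      by_cases h0 : n = "critical"
      · have hd : pvSEVERITY_RANK.getD "critical" (-1) = 4 := by decide
        have hdown : pvFindByRank pvSEVERITY_RANK.items 3 = some "high" := by decide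
        simp only [h0, hd]
        by_cases htest : "test" ∈ ts ∨ "staging" ∈ ts ∨ "development" ∈ ts ∨ "sandbox" ∈ ts <;>
          by_cases hprod : "live" ∈ ts ∨ "production" ∈ ts ∨ "prod" ∈ ts <;>
          simp [htest, hprod, hdown, pv_exists_mem4, pv_exists_mem3,
            hT, hP, hD, hU, PySem.Set.isdisjoint, PySem.Dict.contains,
            PySem.Dict.getD_eq_get?_getD, PySem.Dict.get?_mk_cons]
      by_cases h1 : n = "high"
      · have hd : pvSEVERITY_RANK.getD "high" (-1) = 3 := by decide
        have hdown : pvFindByRank pvSEVERITY_RANK.items 2 = some "medium" := by decide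
        have hup : pvFindByRank pvSEVERITY_RANK.items 4 = some "critical" := by decide
        simp only [h1, hd]
        by_cases htest : "test" ∈ ts ∨ "staging" ∈ ts ∨ "development" ∈ ts ∨ "sandbox" ∈ ts <;>
          by_cases hprod : "live" ∈ ts ∨ "production" ∈ ts ∨ "prod" ∈ ts <;>
          simp [htest, hprod, hdown, hup, pv_exists_mem4, pv_exists_mem3,
            hT, hP, hD, hU, PySem.Set.isdisjoint, PySem.Dict.contains,
            PySem.Dict.getD_eq_get?_getD, PySem.Dict.get?_mk_cons]
      by_cases h2 : n = "medium"
      · have hd : pvSEVERITY_RANK.getD "medium" (-1) = 2 := by decide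
        have hdown : pvFindByRank pvSEVERITY_RANK.items 1 = some "low" := by decide
        have hup : pvFindByRank pvSEVERITY_RANK.items 3 = some "high" := by decide
        simp only [h2, hd]
        by_cases htest : "test" ∈ ts ∨ "staging" ∈ ts ∨ "development" ∈ ts ∨ "sandbox" ∈ ts <;>
          by_cases hprod : "live" ∈ ts ∨ "production" ∈ ts ∨ "prod" ∈ ts <;>
          simp [htest, hprod, hdown, hup, pv_exists_mem4, pv_exists_mem3,
            hT, hP, hD, hU, PySem.Set.isdisjoint, PySem.Dict.contains,
            PySem.Dict.getD_eq_get?_getD, PySem.Dict.get?_mk_cons]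
      by_cases h3 : n = "low"
      · have hd : pvSEVERITY_RANK.getD "low" (-1) = 1 := by decide
        have hup : pvFindByRank pvSEVERITY_RANK.items 2 = some "medium" := by decide
        simp only [h3, hd]
        by_cases htest : "test" ∈ ts ∨ "staging" ∈ ts ∨ "development" ∈ ts ∨ "sandbox" ∈ ts <;>
          by_cases hprod : "live" ∈ ts ∨ "production" ∈ ts ∨ "prod" ∈ ts <;>
          simp [htest, hprod, hup, pv_exists_mem4, pv_exists_mem3,
            hT, hP, hD, hU, PySem.Set.isdisjoint, PySem.Dict.contains,
            PySem.Dict.getD_eq_get?_getD, PySem.Dict.get?_mk_cons]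
      by_cases h4 : n = "info"
      · have hd : pvSEVERITY_RANK.getD "info" (-1) = 0 := by decide
        have hup : pvFindByRank pvSEVERITY_RANK.items 1 = some "low" := by decide
        simp only [h4, hd]
        by_cases htest : "test" ∈ ts ∨ "staging" ∈ ts ∨ "development" ∈ ts ∨ "sandbox" ∈ ts <;>
          by_cases hprod : "live" ∈ ts ∨ "production" ∈ ts ∨ "prod" ∈ ts <;>
          simp [htest, hprod, hup, pv_exists_mem4, pv_exists_mem3,
            hT, hP, hD, hU, PySem.Set.isdisjoint, PySem.Dict.contains,
            PySem.Dict.getD_eq_get?_getD, PySem.Dict.get?_mk_cons]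
      have hmk : pvSEVERITY_RANK = PySem.Dict.mk [("critical",(4:Int)),("high",3),("medium",2),("low",1),("info",0)] := by rfl
      have hd : pvSEVERITY_RANK.getD n (-1) = -1 := by
        rw [hmk]
        simp [PySem.Dict.getD_eq_get?_getD, PySem.Dict.get?,
          Ne.symm h0, Ne.symm h1, Ne.symm h2, Ne.symm h3, Ne.symm h4]
      have hcd : pvDOWNGRADE.contains n = false := by
        simp [hD, PySem.Dict.contains, Ne.symm h0, Ne.symm h1, Ne.symm h2]
      have hcu : pvUPGRADE.contains n = false := by
        simp [hU, PySem.Dict.contains, Ne.symm h1, Ne.symm h2, Ne.symm h3, Ne.symm h4]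
      simp [hd, hcd, hcu]

-- ===== VERDICT (by name: the statement is the Claim_ definition above) =====
theorem get_provider_aware_severity_spec : Claim_equal_get_provider_aware_severity := by
  intro b tv tags _
  show get_provider_aware_severity b tv tags = get_provider_aware_severity_alt b tv tags
  exact pv_eq_all b tv tags
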